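-- pv_equiv track=rewrite | github.com/lynxkite/lynxkite | sphynx/python/llm_pandas_on_graph.py | parse_examples
-- ===== SOURCE A (Python) =====
-- def parse_examples(examples):
--   examples = examples.strip().replace('\t', '  ')
--   if not examples:
--     return None
--   lines = examples.split('\n')
--   parsed = []
--   for line in lines:
--     line = line.rstrip()
--     if not line:
--       continue
--     if line.startswith('  '):
--       parsed[-1][1] += line + '\n'
--     else:
--       parsed.append([line.rstrip(':'), ''])
--   return parsed
-- ===== SOURCE B (Python) =====
-- def parse_examples(examples):
--   examples = examples.strip().replace('\t', '  ')
--   if not examples: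
--     return None
--   lines = [l.rstrip() for l in examples.split('\n') if l.rstrip()]
--   result = []
--   i = 0
--   while i < len(lines):
--     j = i + 1
--     while j < len(lines) and lines[j].startswith('  '):
--       j += 1
--     result.append([lines[i].rstrip(':'), ''.join(l + '\n' for l in lines[i + 1:j])])
--     i = j
--   return result
-- ===== Notes on version B (the rewrite author's own statement) =====
-- stated objective: alternative
-- what changed: A builds the result in one pass by appending indented lines to the mutable last entry; B first filters the rstripped non-blank lines and then groups them block-by-block, slicing each header's indented block out in one step and joining it into the body.
import Mathlib
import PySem

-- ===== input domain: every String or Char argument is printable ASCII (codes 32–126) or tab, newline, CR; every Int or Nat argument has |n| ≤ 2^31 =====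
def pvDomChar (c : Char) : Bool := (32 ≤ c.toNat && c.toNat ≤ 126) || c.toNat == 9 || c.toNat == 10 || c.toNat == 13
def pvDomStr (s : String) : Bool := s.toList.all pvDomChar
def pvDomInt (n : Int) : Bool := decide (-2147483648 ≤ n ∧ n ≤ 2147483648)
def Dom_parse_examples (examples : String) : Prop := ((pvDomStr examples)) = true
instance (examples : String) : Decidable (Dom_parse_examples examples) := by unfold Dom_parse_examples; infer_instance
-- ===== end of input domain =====

-- B groups the pre-filtered rstripped non-blank lines block-by-block (header + its indented block)
-- instead of A's single pass that appends each indented line to the mutable last entry; same cost,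
-- different decomposition. Equivalence of the RETURN value is proved for every input string.

-- ===== PORT A =====
-- exact port of Python's str.rstrip(':') on char lists (strip all trailing ':')
def pvRstripColon (s : List Char) : List Char := (s.reverse.dropWhile (· == ':')).reverse

-- port of `parsed[-1][1] += s`; on empty `parsed` Python raises IndexError — unreachable
-- for every input (the first kept line never starts with two spaces), we return `parsed`
def pvApLast (parsed : List (List (List Char))) (s : List Char) : List (List (List Char)) :=
  match parsed.getLast? with
  | some [lab, body] => parsed.dropLast ++ [[lab, body ++ s]]
  | _ => parsed

def parse_examples (examples : String) : Option (List (List String)) :=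
  let ex := PySem.Chars.replace (PySem.Chars.strip examples.toList) ['\t'] [' ', ' ']
  if ex.isEmpty then none
  else
    let lines := PySem.Chars.splitOn ex ['\n']
    let parsed := lines.foldl (fun parsed line =>
      let line := PySem.Chars.rstrip line
      if line.isEmpty then parsed
      else if PySem.Chars.startswith line [' ', ' '] then pvApLast parsed (line ++ ['\n'])
      else parsed ++ [[pvRstripColon line, []]]) []
    some (parsed.map (fun e => e.map (fun cs => String.ofList cs)))

-- ===== PORT B =====
-- one [label, body] group per header line: the body is the join of the following indented block
def pvGroups : List (List Char) → List (List (List Char))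
  | [] => []
  | h :: t =>
      [pvRstripColon h,
       PySem.Chars.join [] ((t.takeWhile (fun l => PySem.Chars.startswith l [' ', ' '])).map (fun l => l ++ ['\n']))]
      :: pvGroups (t.dropWhile (fun l => PySem.Chars.startswith l [' ', ' ']))
  termination_by l => l.length
  decreasing_by
    simp only [List.length_cons]
    exact Nat.lt_succ_of_le (List.length_dropWhile_le _ t)

def parse_examples_alt (examples : String) : Option (List (List String)) :=
  let ex := PySem.Chars.replace (PySem.Chars.strip examples.toList) ['\t'] [' ', ' ']
  if ex.isEmpty then none
  else
    let L := ((PySem.Chars.splitOn ex ['\n']).filter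
        (fun l => !(PySem.Chars.rstrip l).isEmpty)).map PySem.Chars.rstrip
    some ((pvGroups L).map (fun e => e.map (fun cs => String.ofList cs)))

-- ===== PRECONDITION & SPEC =====
def Spec_parse_examples (examples : String) (out : Option (List (List String))) : Prop := out = parse_examples_alt examples
instance (examples : String) (out : Option (List (List String))) : Decidable (Spec_parse_examples examples out) := by unfold Spec_parse_examples; infer_instance

-- ===== CLAIM (what is proved, stated in full; the proofs are below) =====
def Claim_equal_parse_examples : Prop := ∀ (examples : String), Dom_parse_examples examples → Spec_parse_examples examples (parse_examples examples)

-- ===== LEMMAS AND PROOFS =====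

-- the loop body of A, and the same body on an already-rstripped non-blank line
def pvStepA (parsed : List (List (List Char))) (line : List Char) : List (List (List Char)) :=
  let line := PySem.Chars.rstrip line
  if line.isEmpty then parsed
  else if PySem.Chars.startswith line [' ', ' '] then pvApLast parsed (line ++ ['\n'])
  else parsed ++ [[pvRstripColon line, []]]

def pvStepB (parsed : List (List (List Char))) (line : List Char) : List (List (List Char)) :=
  if PySem.Chars.startswith line [' ', ' '] then pvApLast parsed (line ++ ['\n'])
  else parsed ++ [[pvRstripColon line, []]]

theorem pv_stepB_pos (parsed : List (List (List Char))) (line : List Char)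
    (h : PySem.Chars.startswith line [' ', ' '] = true) :
    pvStepB parsed line = pvApLast parsed (line ++ ['\n']) := by simp [pvStepB, h]

theorem pv_stepB_neg (parsed : List (List (List Char))) (line : List Char)
    (h : PySem.Chars.startswith line [' ', ' '] = false) :
    pvStepB parsed line = parsed ++ [[pvRstripColon line, []]] := by simp [pvStepB, h]

theorem pv_stepA_eq (parsed : List (List (List Char))) (line : List Char) :
    pvStepA parsed line
      = if (PySem.Chars.rstrip line).isEmpty then parsed else pvStepB parsed (PySem.Chars.rstrip line) := rfl

theorem pv_join_cons (x : List Char) (xs : List (List Char)) :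
    PySem.Chars.join [] (x :: xs) = x ++ PySem.Chars.join [] xs := by
  cases xs with
  | nil => simp [PySem.Chars.join_singleton, PySem.Chars.join_nil]
  | cons y ys => simp [PySem.Chars.join_cons_cons]

theorem pv_apLast_concat (acc : List (List (List Char))) (lab body s : List Char) :
    pvApLast (acc ++ [[lab, body]]) s = acc ++ [[lab, body ++ s]] := by
  simp [pvApLast]

theorem pv_fold_filter (lines : List (List Char)) (acc : List (List (List Char))) :
    lines.foldl pvStepA acc
      = ((lines.filter (fun l => !(PySem.Chars.rstrip l).isEmpty)).map PySem.Chars.rstrip).foldl pvStepB acc := by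
  induction lines generalizing acc with
  | nil => rfl
  | cons l ls ih =>
    rw [List.foldl_cons, List.filter_cons, pv_stepA_eq]
    by_cases h : (PySem.Chars.rstrip l).isEmpty
    · rw [if_pos h, if_neg (by simp [h])]
      exact ih acc
    · rw [if_neg h, if_pos (by simp [h]), List.map_cons, List.foldl_cons]
      exact ih _

-- grouping invariant: running A's (filtered) loop from a state that ends in [lab, body]
-- extends that body with the next indented block and then processes the rest
theorem pv_group_invariant (L : List (List Char)) (acc : List (List (List Char))) (lab body : List Char) :
    L.foldl pvStepB (acc ++ [[lab, body]])
    = acc ++ [[lab, body ++ PySem.Chars.join []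
          ((L.takeWhile (fun l => PySem.Chars.startswith l [' ', ' '])).map (fun l => l ++ ['\n']))]]
        ++ pvGroups (L.dropWhile (fun l => PySem.Chars.startswith l [' ', ' '])) := by
  induction L generalizing acc lab body with
  | nil => simp [pvGroups, PySem.Chars.join_nil]
  | cons l t ih =>
    by_cases hl : PySem.Chars.startswith l [' ', ' '] = true
    · rw [List.foldl_cons, pv_stepB_pos _ _ hl, pv_apLast_concat, ih]
      simp only [List.takeWhile_cons, List.dropWhile_cons, hl, if_true, List.map_cons, pv_join_cons]
      simp [List.append_assoc]
    · have hl' : PySem.Chars.startswith l [' ', ' '] = false := by simpa using hl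
      rw [List.foldl_cons, pv_stepB_neg _ _ hl']
      rw [ih (acc ++ [[lab, body]]) (pvRstripColon l) []]
      simp only [List.takeWhile_cons, List.dropWhile_cons, hl', Bool.false_eq_true, if_false,
        List.map_nil, PySem.Chars.join_nil, List.append_nil]
      have hg : pvGroups (l :: t)
          = [pvRstripColon l,
             PySem.Chars.join [] ((t.takeWhile (fun l => PySem.Chars.startswith l [' ', ' '])).map (fun l => l ++ ['\n']))]
            :: pvGroups (t.dropWhile (fun l => PySem.Chars.startswith l [' ', ' '])) := by
        simp [pvGroups]
      rw [hg]
      simp [List.append_assoc]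

theorem pv_fold_groups (L : List (List Char))
    (hhead : ∀ h t, L = h :: t → PySem.Chars.startswith h [' ', ' '] = false) :
    L.foldl pvStepB [] = pvGroups L := by
  cases L with
  | nil => simp [pvGroups]
  | cons h t =>
    rw [List.foldl_cons, pv_stepB_neg _ _ (hhead h t rfl), List.nil_append]
    have h2 := pv_group_invariant t [] (pvRstripColon h) []
    simp only [List.nil_append] at h2
    rw [h2]
    simp [pvGroups]

-- `strip` leaves no leading whitespace
theorem pv_strip_head (cs : List Char) (c : Char) (t : List Char)
    (h : PySem.Chars.strip cs = c :: t) : PySem.Chars.isspace c = false := by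
  have h0 : List.dropWhile PySem.Chars.isspace (PySem.Chars.lstrip cs).reverse <:+
      (PySem.Chars.lstrip cs).reverse := List.dropWhile_suffix _
  have hpre := List.reverse_prefix.mpr h0
  rw [List.reverse_reverse] at hpre
  rw [show (List.dropWhile PySem.Chars.isspace (PySem.Chars.lstrip cs).reverse).reverse
        = PySem.Chars.strip cs from rfl, h] at hpre
  obtain ⟨s, hs⟩ := hpre
  have hd : List.dropWhile PySem.Chars.isspace cs = c :: (t ++ s) := by
    rw [show List.dropWhile PySem.Chars.isspace cs = PySem.Chars.lstrip cs from rfl, ← hs]; simp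
  have hne : List.dropWhile PySem.Chars.isspace cs ≠ [] := by simp [hd]
  have hh := List.head_dropWhile_not PySem.Chars.isspace hne
  have hc' : (List.dropWhile PySem.Chars.isspace cs).head hne = c := by simp [hd]
  rwa [hc'] at hh

theorem pv_replace_go_acc (old new : List Char) (fuel : Nat) (l acc : List Char) :
    PySem.Chars.replace.go old new fuel l acc = acc.reverse ++ PySem.Chars.replace.go old new fuel l [] := by
  induction fuel generalizing l acc with
  | zero => simp [PySem.Chars.replace.go]
  | succ n ih =>
    cases l with
    | nil => simp [PySem.Chars.replace.go]
    | cons c r =>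
      by_cases hp : old.isPrefixOf (c :: r) = true
      · rw [PySem.Chars.replace.go, if_pos hp, PySem.Chars.replace.go, if_pos hp]
        rw [ih _ (new.reverse ++ acc), ih _ (new.reverse ++ [])]
        simp
      · rw [PySem.Chars.replace.go, if_neg hp, PySem.Chars.replace.go, if_neg hp]
        rw [ih _ (c :: acc), ih _ (c :: [])]
        simp

-- `replace '\t' '  '` keeps a non-tab head character
theorem pv_replace_head (c : Char) (t : List Char) (hc : c ≠ '\t') :
    ∃ r, PySem.Chars.replace (c :: t) ['\t'] [' ', ' '] = c :: r := by
  refine ⟨PySem.Chars.replace.go ['\t'] [' ', ' '] t.length t [], ?_⟩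
  have hnp : (['\t'] : List Char).isPrefixOf (c :: t) = false := by
    simp [List.isPrefixOf]
    intro h; exact absurd h.symm hc
  rw [PySem.Chars.replace]
  rw [if_neg (by simp)]
  simp only [List.length_cons]
  rw [PySem.Chars.replace.go, if_neg (by simp [hnp])]
  rw [pv_replace_go_acc]
  simp

theorem pv_splitOn_go_piece (sep : List Char) (fuel : Nat) (l cur : List Char) (acc : List (List Char)) :
    ∃ p r, PySem.Chars.splitOn.go sep fuel l cur acc = acc.reverse ++ (cur.reverse ++ p) :: r := by
  induction fuel generalizing l cur acc with
  | zero => exact ⟨l, [], by simp [PySem.Chars.splitOn.go]⟩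
  | succ n ih =>
    cases l with
    | nil => exact ⟨[], [], by simp [PySem.Chars.splitOn.go]⟩
    | cons c r =>
      by_cases hp : sep.isPrefixOf (c :: r) = true
      · obtain ⟨p, rs, hgo⟩ := ih (List.drop sep.length (c :: r)) [] (cur.reverse :: acc)
        refine ⟨[], p :: rs, ?_⟩
        rw [PySem.Chars.splitOn.go, if_pos hp, hgo]
        simp
      · obtain ⟨p, rs, hgo⟩ := ih r (c :: cur) acc
        refine ⟨c :: p, rs, ?_⟩
        rw [PySem.Chars.splitOn.go, if_neg hp, hgo]
        simp

-- the first piece of splitOn starts with the head of the string (when it is not the separator)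
theorem pv_splitOn_head (c : Char) (t : List Char) (hc : c ≠ '\n') :
    ∃ p r, PySem.Chars.splitOn (c :: t) ['\n'] = (c :: p) :: r := by
  have hnp : (['\n'] : List Char).isPrefixOf (c :: t) = false := by
    simp [List.isPrefixOf]
    intro h; exact absurd h.symm hc
  rw [PySem.Chars.splitOn]
  simp only [List.length_cons]
  rw [PySem.Chars.splitOn.go, if_neg (by simp [hnp])]
  obtain ⟨p, rs, hgo⟩ := pv_splitOn_go_piece ['\n'] (t.length + 1) t [c] []
  exact ⟨p, rs, by rw [hgo]; simp⟩

theorem pv_rstrip_head (c : Char) (t : List Char) (hc : PySem.Chars.isspace c = false) :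
    ∃ r, PySem.Chars.rstrip (c :: t) = c :: r := by
  have hne : (c :: t).reverse.dropWhile PySem.Chars.isspace ≠ [] := by
    intro h
    rw [List.dropWhile_eq_nil_iff] at h
    have := h c (by simp)
    rw [this] at hc; exact absurd hc (by simp)
  have h0 : List.dropWhile PySem.Chars.isspace (c :: t).reverse <:+ (c :: t).reverse :=
    List.dropWhile_suffix _
  have hpre := List.reverse_prefix.mpr h0
  rw [List.reverse_reverse] at hpre
  have hne2 : PySem.Chars.rstrip (c :: t) ≠ [] := by
    simp only [PySem.Chars.rstrip]
    simpa using hne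
  cases hr : PySem.Chars.rstrip (c :: t) with
  | nil => exact absurd hr hne2
  | cons d ds =>
    rw [show (List.dropWhile PySem.Chars.isspace (c :: t).reverse).reverse
          = PySem.Chars.rstrip (c :: t) from rfl, hr] at hpre
    obtain ⟨s, hs⟩ := hpre
    simp only [List.cons_append] at hs
    exact ⟨ds, by rw [List.cons.injEq] at hs; rw [hs.1]⟩

-- ===== VERDICT (by name: the statement is the Claim_ definition above) =====
theorem parse_examples_spec : Claim_equal_parse_examples := by
  intro examples _
  unfold Spec_parse_examples parse_examples parse_examples_alt
  by_cases hex : (PySem.Chars.replace (PySem.Chars.strip examples.toList) ['\t'] [' ', ' ']).isEmpty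
  · simp [hex]
  · rw [if_neg hex, if_neg hex]
    show some ((List.foldl pvStepA []
        (PySem.Chars.splitOn (PySem.Chars.replace (PySem.Chars.strip examples.toList) ['\t'] [' ', ' ']) ['\n'])).map
        (fun e => e.map (fun cs => String.ofList cs)))
      = some ((pvGroups (((PySem.Chars.splitOn (PySem.Chars.replace (PySem.Chars.strip examples.toList) ['\t'] [' ', ' ']) ['\n']).filter
          (fun l => !(PySem.Chars.rstrip l).isEmpty)).map PySem.Chars.rstrip)).map
        (fun e => e.map (fun cs => String.ofList cs)))
    rw [pv_fold_filter]
    congr 2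
    apply pv_fold_groups
    intro h t hL
    cases hst : PySem.Chars.strip examples.toList with
    | nil =>
      exfalso; apply absurd hex; simp [hst]; rfl
    | cons c t0 =>
      have hcs : PySem.Chars.isspace c = false := pv_strip_head examples.toList c t0 hst
      have hct : c ≠ '\t' := by intro h'; rw [h'] at hcs; exact absurd hcs (by decide)
      obtain ⟨r1, hrep⟩ := pv_replace_head c t0 hct
      rw [hst, hrep] at hL
      have hcn : c ≠ '\n' := by intro h'; rw [h'] at hcs; exact absurd hcs (by decide)
      obtain ⟨p, rs, hsplit⟩ := pv_splitOn_head c r1 hcn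
      rw [hsplit] at hL
      obtain ⟨r2, hrs⟩ := pv_rstrip_head c p hcs
      rw [List.filter_cons, if_pos (by simp [hrs])] at hL
      rw [List.map_cons, hrs] at hL
      rw [List.cons.injEq] at hL
      rw [← hL.1]
      have hcsp : c ≠ ' ' := by intro h'; rw [h'] at hcs; exact absurd hcs (by decide)
      simp [PySem.Chars.startswith, List.isPrefixOf]
      intro h'; exact absurd h'.symm hcsp
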